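-- pv_equiv track=rewrite | github.com/nandandiwan/Berkeley-Transport-Simulator | src/negf/gf/general_rgf/pairwise_partial_inverse.py | _make_partition
-- ===== SOURCE A (Python) =====
-- from typing import Iterable, List, Sequence, Tuple
--
-- def _make_partition(num_blocks: int, processes: int | None) -> List[Tuple[int, int]]:
--     if num_blocks <= 0:
--         raise ValueError("num_blocks must be positive.")
--     if processes is None or processes <= 0:
--         processes = num_blocks
--     processes = min(processes, num_blocks)
--     base = num_blocks // processes
--     remainder = num_blocks % processes
--     partition: List[Tuple[int, int]] = []
--     start = 0
--     for pid in range(processes):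
--         size = base + (1 if pid < remainder else 0)
--         if size == 0:
--             continue
--         end = start + size - 1
--         partition.append((start, end))
--         start = end + 1
--     if start != num_blocks:
--         raise RuntimeError("Partitioning error: did not cover all blocks.")
--     return partition
-- ===== SOURCE B (Python) =====
-- from typing import List, Tuple
--
-- def _make_partition(num_blocks: int, processes: "int | None") -> List[Tuple[int, int]]:
--     if num_blocks <= 0:
--         raise ValueError("num_blocks must be positive.")
--     if processes is None or processes <= 0:
--         processes = num_blocks
--     processes = min(processes, num_blocks)
--     base, remainder = divmod(num_blocks, processes)
--     return [
--         (i * base + min(i, remainder), (i + 1) * base + min(i + 1, remainder) - 1)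
--         for i in range(processes)
--     ]
-- ===== Notes on version B (the rewrite author's own statement) =====
-- stated objective: alternative
-- what changed: Replaces the sequential loop with a running `start` accumulator (and its dead size==0/coverage-check branches) by an independent closed-form per-index formula start_i = i*base + min(i, remainder), end_i = (i+1)*base + min(i+1, remainder) - 1.
import Mathlib
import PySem

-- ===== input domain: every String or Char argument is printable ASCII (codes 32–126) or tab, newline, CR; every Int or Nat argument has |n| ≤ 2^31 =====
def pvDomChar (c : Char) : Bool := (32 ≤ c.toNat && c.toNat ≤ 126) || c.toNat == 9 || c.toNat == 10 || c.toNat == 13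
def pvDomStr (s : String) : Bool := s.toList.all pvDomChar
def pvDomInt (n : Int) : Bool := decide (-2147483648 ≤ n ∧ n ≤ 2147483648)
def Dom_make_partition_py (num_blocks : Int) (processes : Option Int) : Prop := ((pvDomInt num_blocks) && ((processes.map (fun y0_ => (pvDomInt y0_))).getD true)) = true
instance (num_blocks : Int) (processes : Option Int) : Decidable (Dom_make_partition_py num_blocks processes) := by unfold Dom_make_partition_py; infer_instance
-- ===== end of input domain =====

-- B computes each range by a closed-form per-index formula instead of A's sequential `start` accumulator; return values agree on all of Pre_.

-- ===== PORT A =====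
-- A's loop builds (partition, start); the final `if start != num_blocks: raise` never fires
-- under Pre_ (base ≥ 1 guarantees coverage), so the port returns the accumulated partition.
def make_partition_py (num_blocks : Int) (processes : Option Int) : List (Int × Int) :=
  let p0 : Int := match processes with
    | none => num_blocks
    | some q => if q ≤ 0 then num_blocks else q
  let p : Int := min p0 num_blocks
  let base := PySem.Int.floordiv num_blocks p
  let rem := PySem.Int.mod num_blocks p
  let st := (PySem.List.pyRange 0 p 1).foldl
    (fun (acc : List (Int × Int) × Int) pid =>
      let size := base + (if pid < rem then 1 else 0)
      if size = 0 then acc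
      else
        let e := acc.2 + size - 1
        (acc.1 ++ [(acc.2, e)], e + 1))
    ([], 0)
  st.1

-- ===== PORT B =====
def make_partition_py_alt (num_blocks : Int) (processes : Option Int) : List (Int × Int) :=
  let p0 : Int := match processes with
    | none => num_blocks
    | some q => if q ≤ 0 then num_blocks else q
  let p : Int := min p0 num_blocks
  let base := PySem.Int.floordiv num_blocks p
  let rem := PySem.Int.mod num_blocks p
  (PySem.List.pyRange 0 p 1).map
    (fun i => (i * base + min i rem, (i + 1) * base + min (i + 1) rem - 1))

-- ===== PRECONDITION & SPEC =====
-- Pre_ excludes exactly num_blocks ≤ 0, where A raises ValueError; everywhere else A returns.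
def Pre_make_partition_py (num_blocks : Int) (processes : Option Int) : Prop := 0 < num_blocks
instance (num_blocks : Int) (processes : Option Int) : Decidable (Pre_make_partition_py num_blocks processes) := by unfold Pre_make_partition_py; infer_instance
def pvWitness_make_partition_py : Int × Option Int := (7, some 3)

def Spec_make_partition_py (num_blocks : Int) (processes : Option Int) (out : List (Int × Int)) : Prop := out = make_partition_py_alt num_blocks processes
instance (num_blocks : Int) (processes : Option Int) (out : List (Int × Int)) : Decidable (Spec_make_partition_py num_blocks processes out) := by unfold Spec_make_partition_py; infer_instance

-- ===== CLAIM (what is proved, stated in full; the proofs are below) =====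
def Claim_equal_make_partition_py : Prop := ∀ (num_blocks : Int) (processes : Option Int), Dom_make_partition_py num_blocks processes → Pre_make_partition_py num_blocks processes → Spec_make_partition_py num_blocks processes (make_partition_py num_blocks processes)

-- ===== LEMMAS AND PROOFS =====

-- A's loop body and B's per-index formula, abstracted over base/remainder.
def pvStepA (base rem : Int) (acc : List (Int × Int) × Int) (pid : Int) : List (Int × Int) × Int :=
  let size := base + (if pid < rem then 1 else 0)
  if size = 0 then acc
  else
    let e := acc.2 + size - 1
    (acc.1 ++ [(acc.2, e)], e + 1)

def pvG (base rem : Int) (i : Int) : Int × Int :=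
  (i * base + min i rem, (i + 1) * base + min (i + 1) rem - 1)

-- Loop invariant: after the first n iterations the partition is the mapped closed form and
-- start = n*base + min n rem.
lemma pv_inv (base rem : Int) (hb : 1 ≤ base) (hr : 0 ≤ rem) (n : Nat) :
    (PySem.List.pyRange 0 (n : Int) 1).foldl (pvStepA base rem) ([], 0)
      = ((PySem.List.pyRange 0 (n : Int) 1).map (pvG base rem),
         (n : Int) * base + min (n : Int) rem) := by
  induction n with
  | zero => simp [PySem.List.pyRange_one_eq_nil, min_eq_left hr]
  | succ k ih =>
    have hsplit : PySem.List.pyRange 0 ((k : Int) + 1) 1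
        = PySem.List.pyRange 0 (k : Int) 1 ++ [(k : Int)] :=
      PySem.List.pyRange_one_succ_right (by positivity)
    push_cast
    rw [hsplit, List.foldl_append, List.map_append, ih]
    simp only [List.foldl, pvStepA]
    have hsz : ¬ (base + (if (k : Int) < rem then 1 else 0) = 0) := by split_ifs <;> omega
    simp only [hsz, if_false, List.map_cons, List.map_nil, pvG, Prod.mk.injEq, List.append_cancel_left_eq,
      List.cons.injEq, and_true]
    by_cases h : (k : Int) < rem
    · have h1 : min ((k : Int) + 1) rem = (k : Int) + 1 := by omega
      have h2 : min (k : Int) rem = (k : Int) := by omega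
      simp only [h, if_true, h1, h2]
      refine ⟨⟨by first | rfl | ring | (split_ifs <;> ring_nf <;> omega) | trivial, by first | rfl | ring | (split_ifs <;> ring_nf <;> omega) | trivial⟩, by first | rfl | ring | (split_ifs <;> ring_nf <;> omega) | trivial⟩
    · have h1 : min ((k : Int) + 1) rem = rem := by omega
      have h2 : min (k : Int) rem = rem := by omega
      simp only [h, if_false, h1, h2]
      refine ⟨⟨by first | rfl | ring | (split_ifs <;> ring_nf <;> omega) | trivial, by first | rfl | ring | (split_ifs <;> ring_nf <;> omega) | trivial⟩, by first | rfl | ring | (split_ifs <;> ring_nf <;> omega) | trivial⟩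

-- A's loop equals B's map for any positive p ≤ nb (instantiated with the ports' shared p).
lemma pv_main (nb p : Int) (hp : 0 < p) (hple : p ≤ nb) :
    ((PySem.List.pyRange 0 p 1).foldl
      (fun (acc : List (Int × Int) × Int) pid =>
        let size := PySem.Int.floordiv nb p + (if pid < PySem.Int.mod nb p then 1 else 0)
        if size = 0 then acc
        else
          let e := acc.2 + size - 1
          (acc.1 ++ [(acc.2, e)], e + 1))
      ([], 0)).1
      = (PySem.List.pyRange 0 p 1).map
          (fun i => (i * PySem.Int.floordiv nb p + min i (PySem.Int.mod nb p),
                     (i + 1) * PySem.Int.floordiv nb p + min (i + 1) (PySem.Int.mod nb p) - 1)) := by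
  have hbase : 1 ≤ PySem.Int.floordiv nb p := by
    rw [PySem.Int.le_floordiv_iff_mul_le hp]; omega
  have hrem : 0 ≤ PySem.Int.mod nb p := PySem.Int.mod_nonneg nb hp
  have hcast : ((p.toNat : Int)) = p := Int.toNat_of_nonneg (le_of_lt hp)
  have hinv := pv_inv (PySem.Int.floordiv nb p) (PySem.Int.mod nb p) hbase hrem p.toNat
  rw [hcast] at hinv
  have hstep : (fun (acc : List (Int × Int) × Int) pid =>
        let size := PySem.Int.floordiv nb p + (if pid < PySem.Int.mod nb p then 1 else 0)
        if size = 0 then acc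
        else
          let e := acc.2 + size - 1
          (acc.1 ++ [(acc.2, e)], e + 1))
      = pvStepA (PySem.Int.floordiv nb p) (PySem.Int.mod nb p) := rfl
  rw [hstep, hinv]; rfl

-- ===== VERDICT (by name: the statement is the Claim_ definition above) =====
theorem make_partition_py_spec : Claim_equal_make_partition_py := by
  intro num_blocks processes _ hpre
  have hnb : 0 < num_blocks := hpre
  unfold Spec_make_partition_py make_partition_py make_partition_py_alt
  have hp0pos : 0 < (match processes with
      | none => num_blocks
      | some q => if q ≤ 0 then num_blocks else q) := by
    rcases processes with _ | q
    · exact hnb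
    · simp only []; split_ifs <;> omega
  exact pv_main num_blocks _ (lt_min hp0pos hnb) (min_le_right _ _)
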